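-- pv_equiv track=rewrite | github.com/faemiyah/dnload | dnload/symbol.py | str_mod2_rem
-- ===== SOURCE A (Python) =====
-- def str_xor(lhs, rhs):
--     """Calculate xor for binary strings."""
--     if len(lhs) != len(rhs):
--         raise RuntimeError("XOR strings '%s' and '%s' are not of same length")
--     ret = ""
--     for ii, jj in zip(lhs, rhs):
--         if ii == jj:
--             ret += "0"
--         else:
--             ret += "1"
--     return ret
--
-- def str_mod2_rem(lhs, rhs):
--     """Calculate remainder modulo 2 for binary strings."""
--     if len(lhs) < len(rhs):
--         raise RuntimeError("MOD2 strings '%s' and '%s' are not of same length")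
--     while True:
--         diff = len(lhs) - len(rhs)
--         if lhs[0] != "0":
--             lhs = str_xor(lhs, rhs + ("0" * diff))[1:]
--         else:
--             lhs = lhs[1:]
--         if diff <= 0:
--             break
--     return lhs
-- ===== SOURCE B (Python) =====
-- def str_mod2_rem(lhs, rhs):
--     """Calculate remainder modulo 2 for binary strings."""
--     if len(lhs) < len(rhs):
--         raise RuntimeError("MOD2 strings '%s' and '%s' are not of same length")
--     n, m = len(lhs), len(rhs)
--     steps = n - m + 1
--     k = 0
--     while k < steps and lhs[k] == '0':
--         k += 1
--     if k == steps:
--         return lhs[steps:]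
--     # first reduction step spans the whole remaining dividend (zero-padded divisor)
--     buf = ['0' if a == b else '1' for a, b in zip(lhs[k + 1:], rhs[1:] + '0' * (n - m - k))]
--     # remaining steps: in-place long division, XORing only the divisor window
--     for i in range(n - m - k):
--         if buf[i] != '0':
--             buf[i + 1:i + m] = ['0' if a == b else '1' for a, b in zip(buf[i + 1:i + m], rhs[1:])]
--     return ''.join(buf[n - m - k:])
-- ===== Notes on version B (the rewrite author's own statement) =====
-- stated objective: alternative
-- what changed: B skips the leading no-op positions, performs one full-width reduction against the zero-padded divisor to initialise a mutable bit buffer, and then does the rest of the long division in place with a sliding window that XORs only the m-1 divisor characters per step, instead of A's rebuilding the whole remaining string with str_xor at every step.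
import Mathlib
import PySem

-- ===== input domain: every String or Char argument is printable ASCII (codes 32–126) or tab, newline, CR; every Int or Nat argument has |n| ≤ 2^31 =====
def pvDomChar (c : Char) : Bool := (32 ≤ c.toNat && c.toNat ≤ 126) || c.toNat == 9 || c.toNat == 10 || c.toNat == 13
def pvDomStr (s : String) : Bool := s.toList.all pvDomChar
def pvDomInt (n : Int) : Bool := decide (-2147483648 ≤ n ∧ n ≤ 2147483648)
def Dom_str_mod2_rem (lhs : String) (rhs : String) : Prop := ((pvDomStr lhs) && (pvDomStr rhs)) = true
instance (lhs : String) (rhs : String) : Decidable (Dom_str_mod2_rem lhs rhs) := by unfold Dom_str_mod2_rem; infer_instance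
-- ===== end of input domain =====

-- B replaces A's per-step full-string rebuild (str_xor against a zero-padded divisor at every
-- step) by: skip the leading no-op positions, one full-width reduction to initialise a bit
-- buffer, then in-place sliding-window XORs of only the divisor characters (an alternative
-- algorithm over a mutable buffer).


-- ===== PORT A =====
-- str_xor: returns none exactly where Python raises RuntimeError (length mismatch)
def strXor (lhs rhs : List Char) : Option (List Char) :=
  if lhs.length ≠ rhs.length then none
  else some ((List.zip lhs rhs).foldl (fun ret p => ret ++ [if p.1 = p.2 then '0' else '1']) [])

-- one body of A's while-loop; [] stands for the two raise paths (IndexError on lhs[0] when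
-- lhs is empty, RuntimeError inside str_xor), both unreachable under Pre_
def aStep (r : List Char) (l : List Char) : List Char :=
  match l with
  | [] => []
  | c :: rest =>
    if c ≠ '0' then
      match strXor l (r ++ List.replicate (((l.length : Int) - (r.length : Int))).toNat '0') with
      | some s => s.drop 1
      | none => []
    else rest

-- needed by aLoop's termination proof
theorem strXor_eq_some (a b : List Char) (h : a.length = b.length) :
    strXor a b = some (List.zipWith (fun x y => if x = y then '0' else '1') a b) := by
  unfold strXor
  rw [if_neg (by omega)]
  rw [PySem.List.foldl_append_singleton_eq_map
    (f := fun p : Char × Char => if p.1 = p.2 then '0' else '1') (l := List.zip a b) (acc := [])]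
  simp [List.zip]

theorem aStep_length_lt (r : List Char) (l : List Char) (h : l ≠ []) :
    (aStep r l).length < l.length := by
  match l with
  | [] => exact absurd rfl h
  | c :: rest =>
    simp only [aStep]
    split
    · rename_i hc
      by_cases hl : (c :: rest).length =
          (r ++ List.replicate (((↑(c :: rest).length : Int) - (↑r.length : Int))).toNat '0').length
      · rw [strXor_eq_some _ _ hl]
        simp [List.length_zipWith]
      · rw [strXor]
        rw [if_pos (by omega)]
        simp
    · simp

def aLoop (r : List Char) (l : List Char) : List Char :=
  let diff : Int := (l.length : Int) - (r.length : Int)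
  let l' := aStep r l
  if diff ≤ 0 then l' else aLoop r l'
termination_by l.length
decreasing_by
  refine aStep_length_lt r l ?_
  rename_i hd
  have hdiff : ¬ ((l.length : Int) - (r.length : Int)) ≤ 0 := hd
  intro hnil
  rw [hnil] at hdiff
  simp at hdiff

def str_mod2_rem (lhs : String) (rhs : String) : String :=
  -- Python raises RuntimeError when len(lhs) < len(rhs); excluded by Pre_
  if lhs.toList.length < rhs.toList.length then ""
  else String.ofList (aLoop rhs.toList lhs.toList)

-- ===== PORT B =====
-- B's leading while-loop: advance k while k < steps and lhs[k] == '0'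
-- (getD is exact here: under Pre_, k < steps ≤ lhs.length, so lhs[k] never raises)
def bSkip (l : List Char) (steps : Nat) (k : Nat) : Nat :=
  if k < steps ∧ l.getD k ' ' = '0' then bSkip l steps (k+1) else k
termination_by steps - k

-- one iteration of B's for-loop: the slice assignment buf[i+1:i+m] = [xor window]
def bStep (r : List Char) (m : Nat) (buf : List Char) (i : Nat) : List Char :=
  if buf.getD i ' ' ≠ '0' then
    buf.take (i+1) ++
      List.zipWith (fun a b => if a = b then '0' else '1') ((buf.drop (i+1)).take (m-1)) (r.drop 1) ++
      buf.drop (i+m)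
  else buf

def str_mod2_rem_alt (lhs : String) (rhs : String) : String :=
  let l := lhs.toList
  let r := rhs.toList
  let n := l.length
  let m := r.length
  -- Python raises RuntimeError when n < m; excluded by Pre_
  if n < m then ""
  else
    let steps := n - m + 1
    let k := bSkip l steps 0
    if k = steps then String.ofList (l.drop steps)
    else
      let buf0 := List.zipWith (fun a b => if a = b then '0' else '1')
        (l.drop (k+1)) (r.drop 1 ++ List.replicate (n - m - k) '0')
      String.ofList (((List.range (n - m - k)).foldl (bStep r m) buf0).drop (n - m - k))

-- ===== PRECONDITION & SPEC =====
-- Pre_ excludes exactly the inputs where A raises: len(lhs) < len(rhs) (RuntimeError) and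
-- rhs = "" (the loop eventually evaluates lhs[0] on an empty string: IndexError).
def Pre_str_mod2_rem (lhs : String) (rhs : String) : Prop :=
  1 ≤ rhs.toList.length ∧ rhs.toList.length ≤ lhs.toList.length
instance (lhs : String) (rhs : String) : Decidable (Pre_str_mod2_rem lhs rhs) := by
  unfold Pre_str_mod2_rem; infer_instance

def pvWitness_str_mod2_rem : String × String := ("10110", "101")

def Spec_str_mod2_rem (lhs : String) (rhs : String) (out : String) : Prop := out = str_mod2_rem_alt lhs rhs
instance (lhs : String) (rhs : String) (out : String) : Decidable (Spec_str_mod2_rem lhs rhs out) := by unfold Spec_str_mod2_rem; infer_instance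

-- ===== CLAIM (what is proved, stated in full; the proofs are below) =====
def Claim_equal_str_mod2_rem : Prop := ∀ (lhs : String) (rhs : String), Dom_str_mod2_rem lhs rhs → Pre_str_mod2_rem lhs rhs → Spec_str_mod2_rem lhs rhs (str_mod2_rem lhs rhs)

-- ===== LEMMAS AND PROOFS =====

-- proof-side iterated form of A's loop body
def aIter (r : List Char) : Nat → List Char → List Char
  | 0, l => l
  | k+1, l => aIter r k (aStep r l)

theorem aIter_succ_right (r : List Char) (k : Nat) :
    ∀ l, aIter r (k+1) l = aStep r (aIter r k l) := by
  induction k with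
  | zero => intro l; rfl
  | succ k ih => intro l; rw [aIter, ih, aIter]

theorem aIter_add (r : List Char) (a b : Nat) :
    ∀ l, aIter r (a + b) l = aIter r b (aIter r a l) := by
  induction a with
  | zero => intro l; rw [Nat.zero_add]; rfl
  | succ a ih =>
    intro l
    have h1 : a + 1 + b = (a + b) + 1 := by omega
    rw [h1, aIter, ih, aIter]

-- what one A-step does, under the loop invariant r.length ≤ l.length (so no raise path fires)
theorem aStep_char (r l : List Char) (hm : 1 ≤ r.length) (hml : r.length ≤ l.length) :
    aStep r l = if l.getD 0 ' ' ≠ '0'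
      then List.zipWith (fun a b => if a = b then '0' else '1') (l.drop 1)
             (r.drop 1 ++ List.replicate (l.length - r.length) '0')
      else l.drop 1 := by
  match l with
  | [] => simp only [List.length_nil, Nat.le_zero] at hml; omega
  | c :: rest =>
    match r with
    | [] => simp at hm
    | r0 :: rtl =>
      simp only [aStep]
      have harith : (((c :: rest).length : Int) - ((r0 :: rtl).length : Int)).toNat
          = (c :: rest).length - (r0 :: rtl).length := Int.toNat_sub _ _
      rw [harith]
      rw [strXor_eq_some _ _ (by
        simp only [List.length_cons, List.length_append, List.length_replicate] at hml ⊢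
        omega)]
      simp only [List.getD_cons_zero, List.drop_one, List.tail_cons]
      split
      · simp only [List.cons_append, List.zipWith_cons_cons]
        simp [List.length_cons]
      · rfl

theorem aStep_length_exact (r l : List Char) (hm : 1 ≤ r.length) (hml : r.length ≤ l.length) :
    (aStep r l).length = l.length - 1 := by
  rw [aStep_char r l hm hml]
  split
  · simp [List.length_zipWith]
    omega
  · simp

theorem aLoop_eq_aIter (r : List Char) (hm : 1 ≤ r.length) :
    ∀ (d : Nat) (l : List Char), l.length = r.length + d → aLoop r l = aIter r (d+1) l := by
  intro d
  induction d with
  | zero =>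
    intro l hl
    rw [aLoop.eq_def]
    simp only
    rw [if_pos (by omega)]
    rfl
  | succ d ih =>
    intro l hl
    rw [aLoop.eq_def]
    simp only
    rw [if_neg (by omega)]
    have hstep : (aStep r l).length = r.length + d := by
      rw [aStep_length_exact r l hm (by omega)]; omega
    rw [ih (aStep r l) hstep]
    rfl

-- while every head seen so far is '0', A's steps just drop heads
theorem aIter_zeros (r : List Char) (hm : 1 ≤ r.length) :
    ∀ (k : Nat) (l : List Char), (∀ j < k, l.getD j ' ' = '0') →
      k + r.length ≤ l.length + 1 → aIter r k l = l.drop k := by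
  intro k
  induction k with
  | zero => intro l _ _; rfl
  | succ k ih =>
    intro l hz hk
    rw [aIter_succ_right, ih l (fun j hj => hz j (by omega)) (by omega)]
    rw [aStep_char r (l.drop k) hm (by rw [List.length_drop]; omega)]
    have hhead : (l.drop k).getD 0 ' ' = l.getD k ' ' := by
      simp [List.getD_eq_getElem?_getD, List.getElem?_drop]
    rw [if_neg (by rw [hhead]; exact not_not_intro (hz k (by omega)))]
    rw [List.drop_drop]

theorem zipWith_xc_binary (a b : List Char) :
    ∀ c ∈ List.zipWith (fun a b => if a = b then '0' else '1') a b, c = '0' ∨ c = '1' := by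
  induction a generalizing b with
  | nil => simp
  | cons x xs ih =>
    cases b with
    | nil => simp
    | cons y ys =>
      intro c hc
      rw [List.zipWith_cons_cons] at hc
      rcases List.mem_cons.1 hc with h | h
      · subst h; split <;> simp
      · exact ih ys c h

theorem zipWith_replicate_nrm (s : List Char) :
    List.zipWith (fun a b => if a = b then '0' else '1') s (List.replicate s.length '0')
      = s.map (fun c => if c = '0' then '0' else '1') := by
  induction s with
  | nil => rfl
  | cons x xs ih => simp [List.replicate_succ, ih]

-- decomposition of A's full-width xor into B's window xor plus a map over the tail
theorem zipWith_pad_split (r1 : List Char) :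
    ∀ (t : List Char) (d : Nat), t.length = r1.length + d →
    List.zipWith (fun a b => if a = b then '0' else '1') t (r1 ++ List.replicate d '0')
      = List.zipWith (fun a b => if a = b then '0' else '1') (t.take r1.length) r1
        ++ (t.drop r1.length).map (fun c => if c = '0' then '0' else '1') := by
  induction r1 with
  | nil =>
    intro t d h
    simp only [List.nil_append, List.length_nil, List.take_zero, List.zipWith_nil_right,
      List.drop_zero] at h ⊢
    obtain rfl : d = t.length := by omega
    rw [zipWith_replicate_nrm]
  | cons r0 r1' ih =>
    intro t d h
    match t with
    | [] => simp only [List.length_nil, List.length_cons] at h; omega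
    | x :: xs =>
      simp only [List.cons_append, List.zipWith_cons_cons, List.length_cons, List.take_succ_cons,
        List.drop_succ_cons]
      rw [ih xs d (by simp at h; omega)]

-- characterisation of B's leading while-loop
theorem bSkip_spec (l : List Char) (steps : Nat) :
    ∀ (d k : Nat), steps - k ≤ d → k ≤ steps →
      k ≤ bSkip l steps k ∧ bSkip l steps k ≤ steps ∧
      (∀ j, k ≤ j → j < bSkip l steps k → l.getD j ' ' = '0') ∧
      (bSkip l steps k = steps ∨ l.getD (bSkip l steps k) ' ' ≠ '0') := by
  intro d
  induction d with
  | zero =>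
    intro k hd hk
    have hks : k = steps := by omega
    rw [bSkip]
    rw [if_neg (by omega)]
    exact ⟨le_refl _, by omega, fun j h1 h2 => absurd (lt_of_le_of_lt h1 h2) (lt_irrefl _), Or.inl hks⟩
  | succ d ih =>
    intro k hd hk
    rw [bSkip]
    by_cases hc : k < steps ∧ l.getD k ' ' = '0'
    · rw [if_pos hc]
      obtain ⟨h1, h2, h3, h4⟩ := ih (k+1) (by omega) (by omega)
      refine ⟨by omega, h2, ?_, h4⟩
      intro j hj1 hj2
      rcases Nat.eq_or_lt_of_le hj1 with h | h
      · rw [← h]; exact hc.2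
      · exact h3 j h hj2
    · rw [if_neg hc]
      refine ⟨le_refl _, hk, fun j h1 h2 => absurd (lt_of_le_of_lt h1 h2) (lt_irrefl _), ?_⟩
      rcases Nat.eq_or_lt_of_le hk with h | h
      · exact Or.inl h
      · exact Or.inr (fun hz => hc ⟨h, hz⟩)

-- the main invariant of B's for-loop against iterated A-steps, over an all-binary buffer
theorem main_inv (r l : List Char) (hm : 1 ≤ r.length) (hml : r.length ≤ l.length)
    (hbin : ∀ c ∈ l, c = '0' ∨ c = '1') :
    ∀ k, k ≤ l.length - r.length + 1 →
      ((List.range k).foldl (bStep r r.length) l).length = l.length ∧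
      ((List.range k).foldl (bStep r r.length) l).drop k = aIter r k l ∧
      (∀ c ∈ (List.range k).foldl (bStep r r.length) l, c = '0' ∨ c = '1') := by
  intro k
  induction k with
  | zero =>
    intro _
    exact ⟨rfl, rfl, hbin⟩
  | succ k ih =>
    intro hk
    obtain ⟨hB, hdrop, hbinB⟩ := ih (by omega)
    set st := (List.range k).foldl (bStep r r.length) l with hst
    rw [List.range_succ, List.foldl_append]
    simp only [List.foldl_cons, List.foldl_nil]
    rw [← hst]
    have hAlen : (aIter r k l).length = l.length - k := by
      rw [← hdrop, List.length_drop, hB]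
    have hhead : st.getD k ' ' = (aIter r k l).getD 0 ' ' := by
      rw [← hdrop]
      simp [List.getD_eq_getElem?_getD, List.getElem?_drop]
    have hAstep := aStep_char r (aIter r k l) hm (by omega)
    have hsucc := aIter_succ_right r k l
    by_cases hc : st.getD k ' ' = '0'
    · -- head is '0': B leaves the buffer alone, A just drops the head
      simp only [bStep]
      rw [if_neg (not_not_intro hc)]
      refine ⟨hB, ?_, hbinB⟩
      rw [hsucc, hAstep, if_neg (not_not_intro (hhead.symm.trans hc)), ← hdrop]
      rw [List.drop_drop]
    · -- head ≠ '0': B xors only the window, A xors the whole zero-padded width; on a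
      -- binary buffer the padded part of A's xor is the identity
      simp only [bStep]
      rw [if_pos hc]
      have hXlen : (st.take (k+1)).length = k + 1 := by
        rw [List.length_take]; omega
      have hZlen : (List.zipWith (fun a b => if a = b then '0' else '1')
          ((st.drop (k+1)).take (r.length - 1)) (r.drop 1)).length = r.length - 1 := by
        simp only [List.length_zipWith, List.length_take, List.length_drop, hB]
        omega
      have hdropdrop : (st.drop (k+1)).drop (r.length - 1) = st.drop (k + r.length) := by
        rw [List.drop_drop]; congr 1; omega
      have hTbin : ∀ c ∈ st.drop (k + r.length), c = '0' ∨ c = '1' := by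
        intro c hcmem
        exact hbinB c (List.drop_subset _ _ hcmem)
      have hAval : aIter r (k+1) l = (List.zipWith (fun a b => if a = b then '0' else '1')
            ((st.drop (k+1)).take (r.length - 1)) (r.drop 1))
          ++ (st.drop (k + r.length)).map (fun c => if c = '0' then '0' else '1') := by
        rw [hsucc, hAstep, if_pos (fun h => hc (hhead.trans h))]
        rw [show (aIter r k l).length - r.length = l.length - k - r.length by omega]
        rw [zipWith_pad_split (r.drop 1) ((aIter r k l).drop 1) (l.length - k - r.length)
          (by simp [hAlen]; omega)]
        rw [← hdrop, List.drop_drop, List.length_drop, hdropdrop]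
      have hAval' : aIter r (k+1) l = (List.zipWith (fun a b => if a = b then '0' else '1')
            ((st.drop (k+1)).take (r.length - 1)) (r.drop 1)) ++ st.drop (k + r.length) := by
        rw [hAval]
        congr 1
        have hid : ∀ c ∈ st.drop (k + r.length),
            (fun c => if c = '0' then '0' else '1') c = c := by
          intro c hcmem
          rcases hTbin c hcmem with h | h <;> simp [h]
        simp [List.map_congr_left hid]
      have hbuf1drop : (st.take (k+1) ++
            List.zipWith (fun a b => if a = b then '0' else '1')
              ((st.drop (k+1)).take (r.length - 1)) (r.drop 1) ++ st.drop (k + r.length)).drop (k+1)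
          = List.zipWith (fun a b => if a = b then '0' else '1')
              ((st.drop (k+1)).take (r.length - 1)) (r.drop 1) ++ st.drop (k + r.length) := by
        rw [List.append_assoc, List.drop_left' hXlen]
      refine ⟨?_, ?_, ?_⟩
      · simp only [List.length_append, hXlen, hZlen, List.length_drop, hB]
        omega
      · rw [hbuf1drop, hAval']
      · intro c hcmem
        simp only [List.append_assoc, List.mem_append] at hcmem
        rcases hcmem with hmem | hmem | hmem
        · exact hbinB c (List.take_subset _ _ hmem)
        · exact zipWith_xc_binary _ _ c hmem
        · exact hTbin c hmem

-- ===== VERDICT (by name: the statement is the Claim_ definition above) =====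
theorem str_mod2_rem_spec : Claim_equal_str_mod2_rem := by
  intro lhs rhs _ hpre
  obtain ⟨hm, hml⟩ := hpre
  unfold Spec_str_mod2_rem str_mod2_rem str_mod2_rem_alt
  simp only [if_neg (by omega : ¬ lhs.toList.length < rhs.toList.length)]
  set l := lhs.toList with hl
  set r := rhs.toList with hr
  set n := l.length with hn
  set m := r.length with hmm
  set steps := n - m + 1 with hsteps
  obtain ⟨hk0, hkle, hkz, hkend⟩ := bSkip_spec l steps steps 0 (by omega) (by omega)
  set k := bSkip l steps 0 with hk
  have hloop := aLoop_eq_aIter r hm (n - m) l (by omega)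
  rw [hloop]
  have hsteps' : n - m + 1 = steps := rfl
  by_cases hks : k = steps
  · -- every head is '0': A drops `steps` heads, B returns lhs[steps:] directly
    rw [if_pos hks, hsteps']
    rw [hks] at hkz
    rw [aIter_zeros r hm steps l (fun j hj => hkz j (by omega) hj) (by omega)]
  · -- first non-zero head at position k < steps
    have hklt : k < steps := lt_of_le_of_ne hkle hks
    have hke : l.getD k ' ' ≠ '0' := by
      rcases hkend with h | h
      · exact absurd h hks
      · exact h
    rw [if_neg hks]
    have hsplit : n - m + 1 = (k + 1) + (n - m - k) := by omega
    rw [hsplit, aIter_add]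
    have hzero : aIter r k l = l.drop k := by
      refine aIter_zeros r hm k l (fun j hj => hkz j (by omega) hj) (by omega)
    have hhead : (l.drop k).getD 0 ' ' = l.getD k ' ' := by
      simp [List.getD_eq_getElem?_getD, List.getElem?_drop]
    have hfirst : aIter r (k + 1) l = List.zipWith (fun a b => if a = b then '0' else '1')
        (l.drop (k+1)) (r.drop 1 ++ List.replicate (n - m - k) '0') := by
      rw [aIter_succ_right, hzero, aStep_char r (l.drop k) hm (by rw [List.length_drop]; omega)]
      rw [if_pos (by rw [hhead]; exact hke)]
      rw [List.drop_drop, List.length_drop]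
      have harith : l.length - k - r.length = n - m - k := by omega
      rw [harith]
    rw [hfirst]
    set buf0 := List.zipWith (fun a b => if a = b then '0' else '1')
        (l.drop (k+1)) (r.drop 1 ++ List.replicate (n - m - k) '0') with hbuf0
    have hbuf0len : buf0.length = n - k - 1 := by
      rw [hbuf0]
      simp only [List.length_zipWith, List.length_drop, List.length_append,
        List.length_replicate]
      omega
    rcases Nat.eq_or_lt_of_le (by omega : k ≤ n - m) with hkeq | hklt2
    · -- k = n - m: no windowed steps remain on either side
      rw [show n - m - k = 0 by omega]
      rfl
    · -- k < n - m: the windowed-division invariant, run for all n - m - k steps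
      have hinv := main_inv r buf0 hm (by omega)
        (fun c hc => zipWith_xc_binary _ _ c hc) (n - m - k) (by omega)
      rw [← hinv.2.1]
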